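-- pv_equiv track=rewrite | github.com/ch1ll-w1th-m3/ServerVNUTour2025 | src/utils/sheets.py | values_to_rows
-- ===== SOURCE A (Python) =====
-- from typing import Dict, List, Tuple
--
-- HEADER_MAP = {
--     "STT": "stt",
--     "Tên đội": "team_name",
--     "ID đội": "team_id",
--     "MSSV": "mssv",
--     "Họ và tên": "full_name",
--     "Link Facebook": "facebook",
--     "Trường": "school",
--     "Khoa": "faculty",
--     "Email": "email",
--     "Số điện thoại": "phone",
-- }
--
-- def values_to_rows(values: List[List[str]]) -> List[Dict[str, str]]:
--     if not values:
--         return []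
--     headers = [h.strip() for h in values[0]]
--     rows: List[Dict[str, str]] = []
--     for r in values[1:]:
--         mapped: Dict[str, str] = {}
--         for idx, cell in enumerate(r):
--             header = headers[idx] if idx < len(headers) else f"col_{idx}"
--             dest = HEADER_MAP.get(header)
--             if dest:
--                 mapped[dest] = (cell or "").strip()
--         rows.append(mapped)
--     return rows
-- ===== SOURCE B (Python) =====
-- from typing import Dict, List, Tuple
--
-- HEADER_MAP = {
--     "STT": "stt",
--     "Tên đội": "team_name",
--     "ID đội": "team_id",
--     "MSSV": "mssv",
--     "Họ và tên": "full_name",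
--     "Link Facebook": "facebook",
--     "Trường": "school",
--     "Khoa": "faculty",
--     "Email": "email",
--     "Số điện thoại": "phone",
-- }
--
-- def _map_row(cols, r):
--     mapped = {}
--     for idx, dest in cols:
--         if idx < len(r):
--             mapped[dest] = (r[idx] or "").strip()
--     return mapped
--
-- def values_to_rows(values: List[List[str]]) -> List[Dict[str, str]]:
--     if not values:
--         return []
--     cols = [(i, HEADER_MAP[h.strip()]) for i, h in enumerate(values[0])
--             if h.strip() in HEADER_MAP]
--     return [_map_row(cols, r) for r in values[1:]]
-- ===== Notes on version B (the rewrite author's own statement) =====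
-- stated objective: faster
-- what changed: Header resolution is done once up front into a (column_index, dest_key) table; each data row then folds only over those mapped columns (guarding idx < len(row)) instead of enumerating every cell and re-doing the header lookup per cell.
import Mathlib
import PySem

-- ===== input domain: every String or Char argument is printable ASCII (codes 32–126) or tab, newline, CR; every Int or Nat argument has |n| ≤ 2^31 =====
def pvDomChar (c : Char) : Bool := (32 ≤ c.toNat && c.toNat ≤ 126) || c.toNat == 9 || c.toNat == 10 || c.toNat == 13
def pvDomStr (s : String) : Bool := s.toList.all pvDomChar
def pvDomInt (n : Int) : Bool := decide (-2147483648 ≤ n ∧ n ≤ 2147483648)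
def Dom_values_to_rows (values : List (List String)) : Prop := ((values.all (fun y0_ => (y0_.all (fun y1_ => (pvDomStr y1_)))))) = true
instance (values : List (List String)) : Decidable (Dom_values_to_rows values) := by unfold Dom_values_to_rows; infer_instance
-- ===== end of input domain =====

-- B precomputes a (column_index, dest_key) table from the headers once, so each data row
-- folds only over the mapped columns instead of enumerating every cell: simpler per-row work.

-- ===== PORT A =====
def HEADER_MAP : PySem.Dict String String := PySem.Dict.ofList
  [("STT", "stt"), ("Tên đội", "team_name"), ("ID đội", "team_id"), ("MSSV", "mssv"),
   ("Họ và tên", "full_name"), ("Link Facebook", "facebook"), ("Trường", "school"),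
   ("Khoa", "faculty"), ("Email", "email"), ("Số điện thoại", "phone")]

-- one step of A's inner loop: look the header of column `idx` up, insert on a hit
-- ((cell or "").strip() = cell.strip() since ("" or "") == "")
def stepA (headers : List String) (m : PySem.Dict String String) (ic : Int × String) :
    PySem.Dict String String :=
  let header := if ic.1 < (headers.length : Int)
                then PySem.List.pyGetD headers ic.1 ""
                else "col_" ++ PySem.Int.toStr ic.1
  match HEADER_MAP.get? header with
  | some dest => m.insert dest (PySem.Str.strip ic.2)
  | none => m

def values_to_rows (values : List (List String)) : List (List (String × String)) :=
  match values with
  | [] => []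
  | v0 :: rest =>
    let headers := v0.map (fun h => PySem.Str.strip h)
    rest.foldl
      (fun rows r =>
        rows ++ [((PySem.List.enumerate r).foldl (stepA headers) PySem.Dict.empty).items])
      []

-- ===== PORT B =====
-- one step of B's per-row loop over the precomputed column table
def stepB (r : List String) (m : PySem.Dict String String) (id_ : Int × String) :
    PySem.Dict String String :=
  if id_.1 < (r.length : Int)
  then m.insert id_.2 (PySem.Str.strip (PySem.List.pyGetD r id_.1 ""))
  else m

def mapRowB (cols : List (Int × String)) (r : List String) : List (String × String) :=
  (cols.foldl (stepB r) PySem.Dict.empty).items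

def values_to_rows_alt (values : List (List String)) : List (List (String × String)) :=
  match values with
  | [] => []
  | v0 :: rest =>
    let cols := (PySem.List.enumerate v0).filterMap
      (fun ih => (HEADER_MAP.get? (PySem.Str.strip ih.2)).map (fun d => (ih.1, d)))
    rest.map (mapRowB cols)

-- ===== PRECONDITION & SPEC =====
def Spec_values_to_rows (values : List (List String)) (out : List (List (String × String))) : Prop := out = values_to_rows_alt values
instance (values : List (List String)) (out : List (List (String × String))) : Decidable (Spec_values_to_rows values out) := by unfold Spec_values_to_rows; infer_instance

-- ===== CLAIM (what is proved, stated in full; the proofs are below) =====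
def Claim_equal_values_to_rows : Prop := ∀ (values : List (List String)), Dom_values_to_rows values → Spec_values_to_rows values (values_to_rows values)

-- ===== LEMMAS AND PROOFS =====

-- common reference shape: fold over zip of (stripped) headers with the row's cells
def zstep (m : PySem.Dict String String) (hc : String × String) : PySem.Dict String String :=
  match HEADER_MAP.get? hc.1 with
  | some dest => m.insert dest (PySem.Str.strip hc.2)
  | none => m

def zfold (m : PySem.Dict String String) (hs : List String) (r : List String) :
    PySem.Dict String String :=
  (hs.zip r).foldl zstep m

-- synthetic headers "col_<i>" never hit HEADER_MAP (every key's first char differs from 'c')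
lemma headerMap_col_none (i : Int) : HEADER_MAP.get? ("col_" ++ PySem.Int.toStr i) = none := by
  have hhd : ("col_" ++ PySem.Int.toStr i).toList.head? = some 'c' := by
    have : ("col_" ++ PySem.Int.toStr i).toList = 'c' :: ('o' :: 'l' :: '_' :: (PySem.Int.toStr i).toList) := by
      simp [String.toList_append]
    simp [this]
  have hne : ∀ k : String, k.toList.head? ≠ some 'c' → (k == "col_" ++ PySem.Int.toStr i) = false := by
    intro k hk
    exact beq_eq_false_iff_ne.mpr (fun he => hk (he ▸ hhd))
  rw [show HEADER_MAP = PySem.Dict.mk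
    [("STT", "stt"), ("Tên đội", "team_name"), ("ID đội", "team_id"), ("MSSV", "mssv"),
     ("Họ và tên", "full_name"), ("Link Facebook", "facebook"), ("Trường", "school"),
     ("Khoa", "faculty"), ("Email", "email"), ("Số điện thoại", "phone")] from rfl]
  simp [PySem.Dict.get?_mk_cons,
    hne "STT" (by decide), hne "Tên đội" (by decide), hne "ID đội" (by decide),
    hne "MSSV" (by decide), hne "Họ và tên" (by decide), hne "Link Facebook" (by decide),
    hne "Trường" (by decide), hne "Khoa" (by decide), hne "Email" (by decide),
    hne "Số điện thoại" (by decide)]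
  rfl

-- A's inner loop, started at column s, is the zip fold over the remaining headers
lemma innerA_eq_zfold (hs : List String) (r : List String) :
    ∀ (s : Nat) (m : PySem.Dict String String),
      (PySem.List.enumerate r (s : Int)).foldl (stepA hs) m = zfold m (hs.drop s) r := by
  induction r with
  | nil => intro s m; simp [PySem.List.enumerate_nil, zfold]
  | cons c r ih =>
    intro s m
    rw [PySem.List.enumerate_cons]
    have hcast : ((s : Int) + 1) = ((s + 1 : Nat) : Int) := by push_cast; ring
    by_cases hlt : s < hs.length
    · have hdrop : hs.drop s = hs[s] :: hs.drop (s + 1) := by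
        rw [List.drop_eq_getElem_cons hlt]
      have hget : PySem.List.pyGetD hs ((s : Nat) : Int) "" = hs[s] := by
        simp [PySem.List.pyGetD_natCast, List.getD_eq_getElem?_getD, hlt]
      simp only [List.foldl_cons, stepA, hcast, ih]
      rw [hdrop]
      have hcond : ((s : Int) < (hs.length : Int)) = True := by
        simp; exact_mod_cast hlt
      simp only [hcond, if_true, hget, zfold, List.zip_cons_cons, List.foldl_cons, zstep]
    · have hdrop : hs.drop s = [] := List.drop_eq_nil_of_le (by omega)
      have hdrop' : hs.drop (s + 1) = [] := List.drop_eq_nil_of_le (by omega)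
      have hcond : ¬ ((s : Int) < (hs.length : Int)) := by
        simp; exact_mod_cast Nat.le_of_not_lt hlt
      simp only [List.foldl_cons, stepA, if_neg hcond, headerMap_col_none, hcast, ih]
      simp [hdrop, hdrop', zfold]

-- B's column table built from headers at positions ≥ s
def colsOf (vs : List String) (s : Nat) : List (Int × String) :=
  (PySem.List.enumerate vs (s : Int)).filterMap
    (fun ih => (HEADER_MAP.get? (PySem.Str.strip ih.2)).map (fun d => (ih.1, d)))

-- once past the row's end, B's row fold does nothing
lemma foldB_past_end (r : List String) :
    ∀ (vs : List String) (s : Nat) (m : PySem.Dict String String), r.length ≤ s →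
      (colsOf vs s).foldl (stepB r) m = m := by
  intro vs
  induction vs with
  | nil => intro s m _; simp [colsOf, PySem.List.enumerate_nil]
  | cons h vs ih =>
    intro s m hle
    have hcast : ((s : Int) + 1) = ((s + 1 : Nat) : Int) := by push_cast; ring
    simp only [colsOf, PySem.List.enumerate_cons, List.filterMap_cons]
    cases hg : HEADER_MAP.get? (PySem.Str.strip h) with
    | none => simpa only [hg, Option.map_none, hcast] using ih (s + 1) m (by omega)
    | some d =>
      have hcond : ¬ ((s : Int) < (r.length : Int)) := by
        simp; exact_mod_cast hle
      simp only [Option.map_some, List.foldl_cons, stepB, if_neg hcond, hcast]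
      exact ih (s + 1) m (by omega)

-- B's row fold over the table from columns ≥ s is the zip fold over the remaining headers
lemma innerB_eq_zfold (r : List String) :
    ∀ (vs : List String) (s : Nat) (m : PySem.Dict String String),
      (colsOf vs s).foldl (stepB r) m
        = zfold m (vs.map (fun h => PySem.Str.strip h)) (r.drop s) := by
  intro vs
  induction vs with
  | nil => intro s m; simp [colsOf, PySem.List.enumerate_nil, zfold]
  | cons h vs ih =>
    intro s m
    have hcast : ((s : Int) + 1) = ((s + 1 : Nat) : Int) := by push_cast; ring
    simp only [colsOf, PySem.List.enumerate_cons, List.filterMap_cons]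
    cases hg : HEADER_MAP.get? (PySem.Str.strip h) with
    | none =>
      simp only [Option.map_none, hcast]
      rw [show ((PySem.List.enumerate vs (((s+1 : Nat) : Int))).filterMap
            (fun ih => (HEADER_MAP.get? (PySem.Str.strip ih.2)).map (fun d => (ih.1, d))))
          = colsOf vs (s+1) from rfl, ih]
      cases hdr : r.drop s with
      | nil =>
        have : r.drop (s+1) = [] := by
          have := List.drop_eq_nil_iff.mp hdr
          exact List.drop_eq_nil_of_le (by omega)
        simp [zfold, this]
      | cons c tl =>
        have htl : r.drop (s+1) = tl := by
          rw [← List.drop_drop]; simp [hdr]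
        simp [zfold, htl, zstep, hg]
    | some d =>
      simp only [Option.map_some, List.foldl_cons, stepB, hcast]
      by_cases hlt : s < r.length
      · have hdr : r.drop s = r[s] :: r.drop (s + 1) := by
          rw [List.drop_eq_getElem_cons hlt]
        have hget : PySem.List.pyGetD r ((s : Nat) : Int) "" = r[s] := by
          simp [PySem.List.pyGetD_natCast, List.getD_eq_getElem?_getD, hlt]
        have hcond : ((s : Int) < (r.length : Int)) := by exact_mod_cast hlt
        rw [if_pos hcond,
          show ((PySem.List.enumerate vs (((s+1 : Nat) : Int))).filterMap
            (fun ih => (HEADER_MAP.get? (PySem.Str.strip ih.2)).map (fun d => (ih.1, d))))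
          = colsOf vs (s+1) from rfl, ih, hget]
        simp only [zfold]
        rw [hdr, List.map_cons, List.zip_cons_cons, List.foldl_cons,
          show zstep m (PySem.Str.strip h, r[s]) = m.insert d (PySem.Str.strip r[s]) from by
            simp [zstep, hg]]
      · have hcond : ¬ ((s : Int) < (r.length : Int)) := by
          simp; exact_mod_cast Nat.le_of_not_lt hlt
        rw [if_neg hcond,
          show ((PySem.List.enumerate vs (((s+1 : Nat) : Int))).filterMap
            (fun ih => (HEADER_MAP.get? (PySem.Str.strip ih.2)).map (fun d => (ih.1, d))))
          = colsOf vs (s+1) from rfl]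
        have h1 : (colsOf vs (s+1)).foldl (stepB r) m = m := foldB_past_end r vs (s+1) m (by omega)
        have hdr : r.drop s = [] := List.drop_eq_nil_of_le (by omega)
        simp [h1, zfold, hdr]

-- per row, both inner computations agree
lemma row_eq (v0 r : List String) :
    ((PySem.List.enumerate r).foldl (stepA (v0.map (fun h => PySem.Str.strip h)))
        PySem.Dict.empty).items
      = mapRowB ((PySem.List.enumerate v0).filterMap
          (fun ih => (HEADER_MAP.get? (PySem.Str.strip ih.2)).map (fun d => (ih.1, d)))) r := by
  have ha := innerA_eq_zfold (v0.map (fun h => PySem.Str.strip h)) r 0 PySem.Dict.empty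
  have hb := innerB_eq_zfold r v0 0 PySem.Dict.empty
  simp only [Nat.cast_zero, List.drop_zero] at ha hb
  unfold mapRowB
  rw [show ((PySem.List.enumerate v0).filterMap
        (fun ih => (HEADER_MAP.get? (PySem.Str.strip ih.2)).map (fun d => (ih.1, d))))
      = colsOf v0 0 from by simp [colsOf], hb, ← ha]

-- ===== VERDICT (by name: the statement is the Claim_ definition above) =====
theorem values_to_rows_spec : Claim_equal_values_to_rows := by
  intro values _
  unfold Spec_values_to_rows values_to_rows values_to_rows_alt
  cases values with
  | nil => rfl
  | cons v0 rest =>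
    simp only []
    rw [PySem.List.foldl_append_singleton_eq_map]
    exact List.map_congr_left (fun r _ => row_eq v0 r)
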